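-- pv_equiv track=rewrite | github.com/mattvsjapan/mvj-notetype | addon/dev_lookup.py | _enumerate_valid_combinations
-- ===== SOURCE A (Python) =====
-- def _enumerate_valid_combinations(
--     anchors: list[list], reading_len: int
-- ) -> list[list[int]]:
--     """Enumerate all valid anchor position combinations (sequential, non-overlapping)."""
--     if not anchors:
--         return [[]]
--
--     def backtrack(idx: int, min_pos: int, current: list[int]) -> list[list[int]]:
--         if idx == len(anchors):
--             return [current[:]]
--         results = []
--         for pos in anchors[idx][2]:
--             if pos < min_pos:
--                 continue
--             current.append(pos)
--             results.extend(backtrack(idx + 1, pos + len(anchors[idx][0]), current))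
--             current.pop()
--         return results
--
--     return backtrack(0, 0, [])
-- ===== SOURCE B (Python) =====
-- def _enumerate_valid_combinations(
--     anchors: list[list], reading_len: int
-- ) -> list[list[int]]:
--     """Iterative layer-by-layer expansion instead of recursive backtracking."""
--     partials = [([], 0)]
--     for anchor in anchors:
--         partials = [
--             (combo + [pos], pos + len(anchor[0]))
--             for combo, min_pos in partials
--             for pos in anchor[2]
--             if pos >= min_pos
--         ]
--     return [combo for combo, _ in partials]
-- ===== Notes on version B (the rewrite author's own statement) =====
-- stated objective: alternative
-- what changed: Replaced the recursive DFS backtracking with mutable current-list by an iterative layer-by-layer worklist of (combo, min_pos) partials expanded once per anchor, preserving the exact output order.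
import Mathlib
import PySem

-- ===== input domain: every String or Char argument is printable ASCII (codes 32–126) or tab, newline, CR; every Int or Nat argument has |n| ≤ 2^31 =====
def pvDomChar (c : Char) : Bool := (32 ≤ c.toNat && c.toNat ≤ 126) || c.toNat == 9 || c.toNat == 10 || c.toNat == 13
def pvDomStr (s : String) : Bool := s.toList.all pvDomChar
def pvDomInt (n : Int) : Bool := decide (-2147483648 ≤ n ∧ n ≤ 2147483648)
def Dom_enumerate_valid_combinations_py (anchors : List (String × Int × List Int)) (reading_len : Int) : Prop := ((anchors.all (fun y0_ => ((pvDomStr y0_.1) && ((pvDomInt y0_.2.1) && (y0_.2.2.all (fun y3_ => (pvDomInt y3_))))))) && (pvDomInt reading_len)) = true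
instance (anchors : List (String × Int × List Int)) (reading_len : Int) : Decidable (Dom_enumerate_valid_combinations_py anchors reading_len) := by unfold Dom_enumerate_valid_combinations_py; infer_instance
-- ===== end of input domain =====

-- B replaces A's recursive backtracking by an iterative layer-by-layer worklist of
-- (combo, min_pos) partials, one expansion pass per anchor (objective: alternative decomposition).

-- ===== PORT A =====
-- the inner recursive 'backtrack(idx, min_pos, current)': recursion over the suffix anchors[idx:]
def pvBacktrack : List (String × Int × List Int) → Int → List Int → List (List Int)
  | [], _, current => [current]
  | a :: rest, min_pos, current =>
      a.2.2.foldl (fun results pos =>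
        if pos < min_pos then results
        else results ++ pvBacktrack rest (pos + PySem.Str.len a.1) (current ++ [pos])) []

def enumerate_valid_combinations_py (anchors : List (String × Int × List Int)) (reading_len : Int) : List (List Int) :=
  if anchors = [] then [[]]
  else pvBacktrack anchors 0 []

-- ===== PORT B =====
-- one expansion step of the worklist: the nested list comprehension of Source B
def pvStep (partials : List (List Int × Int)) (a : String × Int × List Int) : List (List Int × Int) :=
  partials.flatMap (fun p =>
    (a.2.2.filter (fun pos => decide (p.2 ≤ pos))).map
      (fun pos => (p.1 ++ [pos], pos + PySem.Str.len a.1)))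

def enumerate_valid_combinations_py_alt (anchors : List (String × Int × List Int)) (reading_len : Int) : List (List Int) :=
  (anchors.foldl pvStep [([], 0)]).map Prod.fst

-- ===== PRECONDITION & SPEC =====
def Spec_enumerate_valid_combinations_py (anchors : List (String × Int × List Int)) (reading_len : Int) (out : List (List Int)) : Prop := out = enumerate_valid_combinations_py_alt anchors reading_len
instance (anchors : List (String × Int × List Int)) (reading_len : Int) (out : List (List Int)) : Decidable (Spec_enumerate_valid_combinations_py anchors reading_len out) := by unfold Spec_enumerate_valid_combinations_py; infer_instance

-- ===== CLAIM (what is proved, stated in full; the proofs are below) =====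
def Claim_equal_enumerate_valid_combinations_py : Prop := ∀ (anchors : List (String × Int × List Int)) (reading_len : Int), Dom_enumerate_valid_combinations_py anchors reading_len → Spec_enumerate_valid_combinations_py anchors reading_len (enumerate_valid_combinations_py anchors reading_len)

-- ===== LEMMAS AND PROOFS =====

-- the worklist expansion distributes over append of worklists
theorem pvFoldl_step_append (anchors : List (String × Int × List Int))
    (L1 L2 : List (List Int × Int)) :
    List.foldl pvStep (L1 ++ L2) anchors =
      List.foldl pvStep L1 anchors ++ List.foldl pvStep L2 anchors := by
  induction anchors generalizing L1 L2 with
  | nil => rfl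
  | cons a rest ih =>
      simp only [List.foldl_cons]
      rw [show pvStep (L1 ++ L2) a = pvStep L1 a ++ pvStep L2 a by
            simp [pvStep, List.flatMap_append], ih]

-- expanding a worklist = expanding each partial alone, in order
theorem pvFoldl_step_flatMap (anchors : List (String × Int × List Int))
    (L : List (List Int × Int)) :
    List.foldl pvStep L anchors = L.flatMap (fun q => List.foldl pvStep [q] anchors) := by
  induction L with
  | nil =>
      induction anchors with
      | nil => rfl
      | cons a rest ih => simpa [pvStep] using ih
  | cons q L ih =>
      rw [show q :: L = [q] ++ L from rfl, pvFoldl_step_append, ih]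
      simp

-- A's inner for-loop with 'continue' is a filter + flatMap
theorem pvLoop_eq_flatMap (poss : List Int) (mp : Int) (g : Int → List (List Int))
    (acc : List (List Int)) :
    poss.foldl (fun results pos => if pos < mp then results else results ++ g pos) acc =
      acc ++ (poss.filter (fun pos => decide (mp ≤ pos))).flatMap g := by
  induction poss generalizing acc with
  | nil => simp
  | cons pos poss ih =>
      by_cases h : pos < mp
      · simp [List.foldl_cons, if_pos h, Int.not_le.mpr h, ih]
      · simp [List.foldl_cons, if_neg h, Int.not_lt.mp h, ih]

-- the backtracking from (cur, mp) equals the worklist expansion of the single partial (cur, mp)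
theorem pvBacktrack_eq (anchors : List (String × Int × List Int)) (mp : Int) (cur : List Int) :
    pvBacktrack anchors mp cur = (List.foldl pvStep [(cur, mp)] anchors).map Prod.fst := by
  induction anchors generalizing mp cur with
  | nil => rfl
  | cons a rest ih =>
      rw [pvBacktrack, List.foldl_cons,
        show pvStep [(cur, mp)] a =
          (a.2.2.filter (fun pos => decide (mp ≤ pos))).map
            (fun pos => (cur ++ [pos], pos + PySem.Str.len a.1)) by simp [pvStep],
        pvFoldl_step_flatMap, pvLoop_eq_flatMap]
      simp only [List.nil_append, List.map_flatMap, List.flatMap_map]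
      exact List.flatMap_congr (fun pos _ => ih _ _)

-- ===== VERDICT (by name: the statement is the Claim_ definition above) =====
theorem enumerate_valid_combinations_py_spec : Claim_equal_enumerate_valid_combinations_py := by
  intro anchors reading_len _
  unfold Spec_enumerate_valid_combinations_py enumerate_valid_combinations_py
    enumerate_valid_combinations_py_alt
  split
  · subst anchors; rfl
  · exact pvBacktrack_eq anchors 0 []
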